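-- pv_equiv track=rewrite | github.com/BrisClimate/Isentropic-mixing-PLD | atmospy/analysis_functions.py | get_timeslice
-- ===== SOURCE A (Python) =====
-- def get_timeslice(tind, mean):
--     if mean is not None:
--         m = int(mean/2)
--     else:
--         m = 0
--     while tind % 30 in [2,3,4]:
--         tind += 1
--     while tind % 30 in [0,1]:
--         tind -= 1
--     while (tind - m) % 30 in [0,1,2,3,4]:
--         tind += 1
--     while (tind + m) % 30 in [0,1,2,3,4]:
--         tind -= 1
--
--     return tind, m
-- ===== SOURCE B (Python) =====
-- def get_timeslice(tind, mean):
--     # closed-form residue jumps instead of while-loops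
--     if mean is None:
--         m = 0
--     elif mean >= 0:
--         m = mean // 2
--     else:
--         m = -((-mean) // 2)
--     r = tind % 30
--     if 2 <= r <= 4:
--         tind += 5 - r
--     r = tind % 30
--     if r <= 1:
--         tind -= r + 1
--     d = (tind - m) % 30
--     if d <= 4:
--         tind += 5 - d
--     e = (tind + m) % 30
--     if e <= 4:
--         tind -= e + 1
--     return tind, m
-- ===== Notes on version B (the rewrite author's own statement) =====
-- stated objective: simpler
-- what changed: Each of the four bounded while-loops that step tind by ±1 until a mod-30 residue condition clears is replaced by a single closed-form modular jump (compute the residue once and add/subtract the exact offset), so B has no loops at all.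
import Mathlib
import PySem

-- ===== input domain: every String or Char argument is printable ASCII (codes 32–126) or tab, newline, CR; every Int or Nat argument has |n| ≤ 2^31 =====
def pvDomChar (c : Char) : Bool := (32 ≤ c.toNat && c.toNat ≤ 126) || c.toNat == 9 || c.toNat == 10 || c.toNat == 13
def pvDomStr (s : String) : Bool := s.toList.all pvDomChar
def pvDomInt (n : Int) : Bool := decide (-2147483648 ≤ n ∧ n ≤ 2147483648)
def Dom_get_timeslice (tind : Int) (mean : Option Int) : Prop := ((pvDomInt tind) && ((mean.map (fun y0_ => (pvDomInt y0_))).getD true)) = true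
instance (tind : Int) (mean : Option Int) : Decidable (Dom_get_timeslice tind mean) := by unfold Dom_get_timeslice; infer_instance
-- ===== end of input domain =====

-- B replaces A's four bounded while-loops (step tind by ±1 until a mod-30 residue condition clears)
-- by four closed-form modular jumps, so B has no loops at all.
-- Python's '%' here always has the positive literal divisor 30, so it equals Lean's Int.emod '%' exactly.

-- ===== PORT A =====
-- Each while-loop is ported with a fuel guard for totality only: fuel 5 is enough, since each
-- loop body moves the relevant mod-30 residue one step toward leaving its (≤ 5-element) residue set,
-- so no loop runs more than 5 iterations.

-- while tind % 30 in [2,3,4]: tind += 1        (at most 3 iterations)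
def gtLoop1 (fuel : Nat) (t : Int) : Int :=
  match fuel with
  | 0 => t
  | f + 1 => if t % 30 ∈ ([2, 3, 4] : List Int) then gtLoop1 f (t + 1) else t

-- while tind % 30 in [0,1]: tind -= 1          (at most 2 iterations)
def gtLoop2 (fuel : Nat) (t : Int) : Int :=
  match fuel with
  | 0 => t
  | f + 1 => if t % 30 ∈ ([0, 1] : List Int) then gtLoop2 f (t - 1) else t

-- while (tind - m) % 30 in [0,1,2,3,4]: tind += 1     (at most 5 iterations)
def gtLoop3 (fuel : Nat) (t m : Int) : Int :=
  match fuel with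
  | 0 => t
  | f + 1 => if (t - m) % 30 ∈ ([0, 1, 2, 3, 4] : List Int) then gtLoop3 f (t + 1) m else t

-- while (tind + m) % 30 in [0,1,2,3,4]: tind -= 1     (at most 5 iterations)
def gtLoop4 (fuel : Nat) (t m : Int) : Int :=
  match fuel with
  | 0 => t
  | f + 1 => if (t + m) % 30 ∈ ([0, 1, 2, 3, 4] : List Int) then gtLoop4 f (t - 1) m else t

def get_timeslice (tind : Int) (mean : Option Int) : Int × Int :=
  -- int(mean/2): on the domain |mean| ≤ 2^31 the float mean/2 is exact and int() truncates
  -- toward zero, so this is exactly Int.tdiv mean 2.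
  let m : Int := match mean with
    | some mv => mv.tdiv 2
    | none => 0
  let t1 := gtLoop1 5 tind
  let t2 := gtLoop2 5 t1
  let t3 := gtLoop3 5 t2 m
  let t4 := gtLoop4 5 t3 m
  (t4, m)

-- ===== PORT B =====
def get_timeslice_alt (tind : Int) (mean : Option Int) : Int × Int :=
  let m : Int := match mean with
    | none => 0
    | some mv => if mv ≥ 0 then PySem.Int.floordiv mv 2 else -(PySem.Int.floordiv (-mv) 2)
  let t1 := let r := tind % 30; if 2 ≤ r ∧ r ≤ 4 then tind + (5 - r) else tind
  let t2 := let r := t1 % 30; if r ≤ 1 then t1 - (r + 1) else t1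
  let t3 := let d := (t2 - m) % 30; if d ≤ 4 then t2 + (5 - d) else t2
  let t4 := let e := (t3 + m) % 30; if e ≤ 4 then t3 - (e + 1) else t3
  (t4, m)

-- ===== PRECONDITION & SPEC =====
def Spec_get_timeslice (tind : Int) (mean : Option Int) (out : Int × Int) : Prop := out = get_timeslice_alt tind mean
instance (tind : Int) (mean : Option Int) (out : Int × Int) : Decidable (Spec_get_timeslice tind mean out) := by unfold Spec_get_timeslice; infer_instance

-- ===== CLAIM (what is proved, stated in full; the proofs are below) =====
def Claim_equal_get_timeslice : Prop := ∀ (tind : Int) (mean : Option Int), Dom_get_timeslice tind mean → Spec_get_timeslice tind mean (get_timeslice tind mean)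

-- ===== LEMMAS AND PROOFS =====
lemma gtLoop1_eq (f : Nat) (t : Int)
    (h : 2 ≤ t % 30 → t % 30 ≤ 4 → 5 - t % 30 ≤ (f : Int)) :
    gtLoop1 f t = (if 2 ≤ t % 30 ∧ t % 30 ≤ 4 then t + (5 - t % 30) else t) := by
  induction f generalizing t with
  | zero =>
    have hn : ¬(2 ≤ t % 30 ∧ t % 30 ≤ 4) := by omega
    simp [gtLoop1, hn]
  | succ f ih =>
    rw [gtLoop1]
    by_cases hc : 2 ≤ t % 30 ∧ t % 30 ≤ 4
    · rw [if_pos (by simp [List.mem_cons]; omega), ih (t + 1) (by omega)]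
      split_ifs <;> omega
    · rw [if_neg (by simp [List.mem_cons]; omega), if_neg hc]

lemma gtLoop2_eq (f : Nat) (t : Int)
    (h : t % 30 ≤ 1 → t % 30 + 1 ≤ (f : Int)) :
    gtLoop2 f t = (if t % 30 ≤ 1 then t - (t % 30 + 1) else t) := by
  induction f generalizing t with
  | zero =>
    have hn : ¬(t % 30 ≤ 1) := by omega
    simp [gtLoop2, hn]
  | succ f ih =>
    rw [gtLoop2]
    by_cases hc : t % 30 ≤ 1
    · rw [if_pos (by simp [List.mem_cons]; omega), ih (t - 1) (by omega)]
      split_ifs <;> omega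
    · rw [if_neg (by simp [List.mem_cons]; omega), if_neg hc]

lemma gtLoop3_eq (f : Nat) (t m : Int)
    (h : (t - m) % 30 ≤ 4 → 5 - (t - m) % 30 ≤ (f : Int)) :
    gtLoop3 f t m = (if (t - m) % 30 ≤ 4 then t + (5 - (t - m) % 30) else t) := by
  induction f generalizing t with
  | zero =>
    have hn : ¬((t - m) % 30 ≤ 4) := by omega
    simp [gtLoop3, hn]
  | succ f ih =>
    rw [gtLoop3]
    by_cases hc : (t - m) % 30 ≤ 4
    · rw [if_pos (by simp [List.mem_cons]; omega), ih (t + 1) (by omega)]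
      split_ifs <;> omega
    · rw [if_neg (by simp [List.mem_cons]; omega), if_neg hc]

lemma gtLoop4_eq (f : Nat) (t m : Int)
    (h : (t + m) % 30 ≤ 4 → (t + m) % 30 + 1 ≤ (f : Int)) :
    gtLoop4 f t m = (if (t + m) % 30 ≤ 4 then t - ((t + m) % 30 + 1) else t) := by
  induction f generalizing t with
  | zero =>
    have hn : ¬((t + m) % 30 ≤ 4) := by omega
    simp [gtLoop4, hn]
  | succ f ih =>
    rw [gtLoop4]
    by_cases hc : (t + m) % 30 ≤ 4
    · rw [if_pos (by simp [List.mem_cons]; omega), ih (t - 1) (by omega)]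
      split_ifs <;> omega
    · rw [if_neg (by simp [List.mem_cons]; omega), if_neg hc]

lemma tdiv_two_eq (mv : Int) :
    mv.tdiv 2 = (if mv ≥ 0 then PySem.Int.floordiv mv 2 else -(PySem.Int.floordiv (-mv) 2)) := by
  rw [PySem.Int.floordiv_eq_ediv_of_pos (by norm_num), PySem.Int.floordiv_eq_ediv_of_pos (by norm_num)]
  rcases (by omega : 0 ≤ mv ∨ mv < 0) with h | h
  · rw [if_pos h, Int.tdiv_eq_ediv_of_nonneg h]
  · rw [if_neg (by omega)]
    have hh : -mv / 2 = (-mv).tdiv 2 := (Int.tdiv_eq_ediv_of_nonneg (by omega)).symm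
    rw [hh, Int.neg_tdiv, neg_neg]

-- ===== VERDICT (by name: the statement is the Claim_ definition above) =====
theorem get_timeslice_spec : Claim_equal_get_timeslice := by
  intro tind mean _
  unfold Spec_get_timeslice
  cases mean with
  | none =>
    simp only [get_timeslice, get_timeslice_alt]
    rw [gtLoop1_eq 5 _ (by omega), gtLoop2_eq 5 _ (by omega),
        gtLoop3_eq 5 _ _ (by omega), gtLoop4_eq 5 _ _ (by omega)]
  | some mv =>
    simp only [get_timeslice, get_timeslice_alt]
    rw [gtLoop1_eq 5 _ (by omega), gtLoop2_eq 5 _ (by omega),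
        gtLoop3_eq 5 _ _ (by omega), gtLoop4_eq 5 _ _ (by omega), tdiv_two_eq]
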